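-- pv_equiv track=rewrite | github.com/zahirekrem09/Python_Code_Challenges | ozyineleme_denemeler.py | slice_r
-- ===== SOURCE A (Python) =====
-- def slice_r(liste, start, end, step):
--     length = len(liste)
--     if start > length: start = length
--     if end > length: end = length
--     if start < -length:
--         start = 0
--     if end == -length:
--         end = 0
--     if start < 0: start += length
--     if end < -length:
--         #buradaki amacim [1, 2, 3, 4, 5][-1:-100:-1] diyince mesela ilk elemani da alabilmek
--         end = 0
--         liste = [0] + liste
--         start += 1
--     if end < 0: end += length
--
--     if step > 0:
--         if start >= end:
--             return []
--         else:
--             return [liste[start]] + slice_r(liste, start+step, end, step)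
--     else:
--         if start <= end:
--             return []
--         else:
--             return [liste[start]] + slice_r(liste, start+step, end, step)
-- ===== SOURCE B (Python) =====
-- def _normalize(liste, start, end):
--     n = len(liste)
--     if start > n: start = n
--     if end > n: end = n
--     if start < -n: start = 0
--     if end == -n: end = 0
--     if start < 0: start += n
--     if end < -n:
--         end = 0
--         liste = [0] + liste
--         start += 1
--     if end < 0: end += n
--     return liste, start, end
--
--
-- def slice_r(liste, start, end, step):
--     liste, s, e = _normalize(liste, start, end)
--     out = []
--     if step > 0:
--         while s < e:
--             out.append(liste[s])
--             s += step
--     else: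
--         while s > e:
--             out.append(liste[s])
--             s += step
--     return out
-- ===== Notes on version B (the rewrite author's own statement) =====
-- stated objective: alternative
-- what changed: A recursively re-normalizes the indices on every call and builds the result by repeated list concatenation [x]+rest; B normalizes the indices once and then runs a single iterative loop that appends into an accumulator, never re-normalizing (and in particular never wrapping a negative cursor back into the list).
-- intended difference: For a negative step whose descent from the normalized start jumps over the whole interval [0,end] (normalized start mod (-step) above end but within reach of the wrap), A's per-call re-normalization wraps the now-negative index back to the top of the list and keeps collecting extra elements (e.g. slice_r([1,2,3],2,0,-4) = [3,2]), while B stops at the end bound and returns the intended slice [3]. — e.g. on slice_r([1, 2, 3], 2, 0, -4): A returns [3, 2], B returns [3]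
import Mathlib
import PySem

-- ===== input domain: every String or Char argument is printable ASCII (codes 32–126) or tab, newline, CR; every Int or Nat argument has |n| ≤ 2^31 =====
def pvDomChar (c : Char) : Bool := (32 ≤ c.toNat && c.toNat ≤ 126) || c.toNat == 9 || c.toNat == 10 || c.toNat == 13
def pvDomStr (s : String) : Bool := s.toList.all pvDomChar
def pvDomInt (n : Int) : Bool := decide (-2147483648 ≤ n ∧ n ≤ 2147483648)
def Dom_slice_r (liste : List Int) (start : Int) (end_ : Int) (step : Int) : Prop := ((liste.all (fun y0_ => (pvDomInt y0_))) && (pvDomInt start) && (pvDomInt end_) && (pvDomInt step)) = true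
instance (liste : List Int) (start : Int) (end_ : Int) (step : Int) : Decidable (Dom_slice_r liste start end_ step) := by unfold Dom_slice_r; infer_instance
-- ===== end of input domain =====

-- B replaces A's recursion (per-call index renormalization + [x]+rest concatenation) by one
-- upfront normalization and a single iterative accumulating loop that never re-wraps the cursor.

-- ===== PORT A =====
-- A's recursion can diverge (e.g. step = 0, or a negative step cycling past end); the fuel
-- liste.length + 2 is a totality guard only — it suffices on every input Pre_ admits.
def sliceRFuel : Nat → List Int → Int → Int → Int → List Int
  | 0, _, _, _, _ => []
  | Nat.succ fuel, liste, start, end_, step =>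
    let length : Int := liste.length
    let start1 := if start > length then length else start
    let end1 := if end_ > length then length else end_
    let start2 := if start1 < -length then 0 else start1
    let end2 := if end1 = -length then 0 else end1
    let start3 := if start2 < 0 then start2 + length else start2
    let liste2 := if end2 < -length then (0 : Int) :: liste else liste
    let start4 := if end2 < -length then start3 + 1 else start3
    let end3 := if end2 < -length then 0 else end2
    let end4 := if end3 < 0 then end3 + length else end3
    if step > 0 then
      if start4 ≥ end4 then []
      else (PySem.List.pyGet? liste2 start4).getD 0 :: sliceRFuel fuel liste2 (start4 + step) end4 step
    else
      if start4 ≤ end4 then []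
      else (PySem.List.pyGet? liste2 start4).getD 0 :: sliceRFuel fuel liste2 (start4 + step) end4 step

def slice_r (liste : List Int) (start : Int) (end_ : Int) (step : Int) : List Int :=
  sliceRFuel (liste.length + 2) liste start end_ step

-- ===== PORT B =====
def normB (liste : List Int) (start : Int) (end_ : Int) : List Int × Int × Int :=
  let length : Int := liste.length
  let start1 := if start > length then length else start
  let end1 := if end_ > length then length else end_
  let start2 := if start1 < -length then 0 else start1
  let end2 := if end1 = -length then 0 else end1
  let start3 := if start2 < 0 then start2 + length else start2
  let liste2 := if end2 < -length then (0 : Int) :: liste else liste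
  let start4 := if end2 < -length then start3 + 1 else start3
  let end3 := if end2 < -length then 0 else end2
  let end4 := if end3 < 0 then end3 + length else end3
  (liste2, start4, end4)

-- B's while-loops, fuel is a totality guard only (B's loop on step = 0, start > end never ends)
def collectPosF : Nat → List Int → Int → Int → Int → List Int
  | 0, _, _, _, _ => []
  | Nat.succ fuel, lst, s, e, step =>
    if s < e then (PySem.List.pyGet? lst s).getD 0 :: collectPosF fuel lst (s + step) e step else []

def collectNegF : Nat → List Int → Int → Int → Int → List Int
  | 0, _, _, _, _ => []
  | Nat.succ fuel, lst, s, e, step =>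
    if s > e then (PySem.List.pyGet? lst s).getD 0 :: collectNegF fuel lst (s + step) e step else []

def slice_r_alt (liste : List Int) (start : Int) (end_ : Int) (step : Int) : List Int :=
  match normB liste start end_ with
  | (lst, s, e) =>
    if step > 0 then collectPosF (liste.length + 2) lst s e step
    else collectNegF (liste.length + 2) lst s e step

-- ===== PRECONDITION & SPEC =====
-- (normalized start, normalized end, effective length) that A's index preprocessing yields,
-- written as closed-form arithmetic on the raw input (n = original length)
def normD (n start end_ : Int) : Int × Int × Int :=
  let s := if start < 0 then max (start + n) 0 else min start n
  if end_ < -n then (s + 1, 0, n + 1)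
  else (s, if end_ < 0 then end_ + n else min end_ n, n)

-- Pre_ excludes exactly the inputs where Python A does not return: IndexError when the normalized
-- start equals the effective length with a non-positive step and start beyond end, and divergence
-- (infinite recursion) for step = 0 with start beyond end or a negative step whose wrapping orbit
-- (residues mod gcd(-step, length)) never reaches the interval [0, end] nor the hard clamp to 0.
def Pre_slice_r (liste : List Int) (start : Int) (end_ : Int) (step : Int) : Prop :=
  let s := (normD (liste.length) start end_).1
  let e := (normD (liste.length) start end_).2.1
  let n' := (normD (liste.length) start end_).2.2
  if step > 0 then True
  else if step = 0 then s ≤ e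
  else s ≤ e ∨ (s ≠ n' ∧ (s % (Int.gcd step n' : Int) ≤ e ∨ s % (Int.gcd step n' : Int) < -step - n'))
instance (liste : List Int) (start : Int) (end_ : Int) (step : Int) : Decidable (Pre_slice_r liste start end_ step) := by unfold Pre_slice_r; infer_instance

def pvWitness_slice_r : List Int × Int × Int × Int := ([1, 2, 3], 0, 3, 1)

-- For a negative step whose descent from the normalized start jumps over the whole interval
-- [0, end], A's per-call re-normalization wraps the now-negative index back to the top of the
-- list and keeps collecting extra elements (e.g. slice_r([1,2,3],2,0,-4) = [3,2]), while B
-- stops at the end bound and returns the intended slice [3].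
def D_slice_r (liste : List Int) (start : Int) (end_ : Int) (step : Int) : Prop :=
  let s := (normD (liste.length) start end_).1
  let e := (normD (liste.length) start end_).2.1
  let m := (normD (liste.length) start end_).2.2
  step < 0 ∧ e < s ∧ s < m ∧ e < s % (-step) ∧ e < s % (-step) + m + step
instance (liste : List Int) (start : Int) (end_ : Int) (step : Int) : Decidable (D_slice_r liste start end_ step) := by unfold D_slice_r; infer_instance

def Spec_slice_r (liste : List Int) (start : Int) (end_ : Int) (step : Int) (out : List Int) : Prop := ¬ D_slice_r liste start end_ step → out = slice_r_alt liste start end_ step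
instance (liste : List Int) (start : Int) (end_ : Int) (step : Int) (out : List Int) : Decidable (Spec_slice_r liste start end_ step out) := by unfold Spec_slice_r; infer_instance

def pvDiffWitness_slice_r : List Int × Int × Int × Int := ([1, 2, 3], 2, 0, -4)
def pvDiffWitnessOut_slice_r : (List Int) × (List Int) := ([3, 2], [3])

-- ===== CLAIM (what is proved, stated in full; the proofs are below) =====
def Claim_unchanged_slice_r : Prop := ∀ (liste : List Int) (start : Int) (end_ : Int) (step : Int), Dom_slice_r liste start end_ step → Pre_slice_r liste start end_ step → Spec_slice_r liste start end_ step (slice_r liste start end_ step)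
def Claim_changed_slice_r : Prop := Dom_slice_r (pvDiffWitness_slice_r.1) (pvDiffWitness_slice_r.2.1) (pvDiffWitness_slice_r.2.2.1) (pvDiffWitness_slice_r.2.2.2) ∧ Pre_slice_r (pvDiffWitness_slice_r.1) (pvDiffWitness_slice_r.2.1) (pvDiffWitness_slice_r.2.2.1) (pvDiffWitness_slice_r.2.2.2) ∧ D_slice_r (pvDiffWitness_slice_r.1) (pvDiffWitness_slice_r.2.1) (pvDiffWitness_slice_r.2.2.1) (pvDiffWitness_slice_r.2.2.2) ∧ slice_r (pvDiffWitness_slice_r.1) (pvDiffWitness_slice_r.2.1) (pvDiffWitness_slice_r.2.2.1) (pvDiffWitness_slice_r.2.2.2) = pvDiffWitnessOut_slice_r.1 ∧ slice_r_alt (pvDiffWitness_slice_r.1) (pvDiffWitness_slice_r.2.1) (pvDiffWitness_slice_r.2.2.1) (pvDiffWitness_slice_r.2.2.2) = pvDiffWitnessOut_slice_r.2 ∧ pvDiffWitnessOut_slice_r.1 ≠ pvDiffWitnessOut_slice_r.2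
def Claim_exact_slice_r : Prop := ∀ (liste : List Int) (start : Int) (end_ : Int) (step : Int), Dom_slice_r liste start end_ step → Pre_slice_r liste start end_ step → D_slice_r liste start end_ step → slice_r liste start end_ step ≠ slice_r_alt liste start end_ step

-- ===== LEMMAS AND PROOFS =====

theorem A_unfold (fuel : Nat) (l : List Int) (a b st : Int) :
    sliceRFuel (fuel + 1) l a b st =
      match normB l a b with
      | (l2, s, e) =>
        if st > 0 then
          if s ≥ e then [] else (PySem.List.pyGet? l2 s).getD 0 :: sliceRFuel fuel l2 (s + st) e st
        else
          if s ≤ e then [] else (PySem.List.pyGet? l2 s).getD 0 :: sliceRFuel fuel l2 (s + st) e st := by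
  rfl

theorem normB_stable (l : List Int) (s e : Int) (h0 : 0 ≤ e) (h1 : e ≤ (l.length : Int)) :
    normB l s e =
      (l, if s > (l.length : Int) then (l.length : Int)
          else if s < -(l.length : Int) then 0
          else if s < 0 then s + l.length else s, e) := by
  simp only [normB, Prod.mk.injEq]
  refine ⟨?_, ?_, ?_⟩ <;> split_ifs <;> first | rfl | omega

set_option maxHeartbeats 1600000 in
theorem normD_normB (l : List Int) (a b : Int) :
    normD (l.length) a b =
      ((normB l a b).2.1, (normB l a b).2.2, ((normB l a b).1.length : Int)) := by
  simp only [normD, normB]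
  split_ifs <;> (try simp only [List.length_cons, Prod.mk.injEq]) <;> and_intros <;> push_cast <;> omega

theorem normB_inv (l : List Int) (a b : Int) :
    0 ≤ (normB l a b).2.1 ∧ (normB l a b).2.1 ≤ ((normB l a b).1.length : Int) ∧
    0 ≤ (normB l a b).2.2 ∧ (normB l a b).2.2 ≤ ((normB l a b).1.length : Int) := by
  simp only [normB]
  split_ifs <;> (try simp only [List.length_cons]) <;> push_cast <;> and_intros <;> first | trivial | omega

theorem collectPosF_succ (fuel : Nat) (lst : List Int) (s e step : Int) :
    collectPosF (fuel + 1) lst s e step =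
      if s < e then (PySem.List.pyGet? lst s).getD 0 :: collectPosF fuel lst (s + step) e step else [] := rfl

theorem collectNegF_succ (fuel : Nat) (lst : List Int) (s e step : Int) :
    collectNegF (fuel + 1) lst s e step =
      if s > e then (PySem.List.pyGet? lst s).getD 0 :: collectNegF fuel lst (s + step) e step else [] := rfl

theorem pos_lemma (fuel : Nat) (l : List Int) (s e st : Int) (hst : 0 < st) (hs : 0 ≤ s)
    (he0 : 0 ≤ e) (he1 : e ≤ (l.length : Int)) :
    sliceRFuel fuel l s e st = collectPosF fuel l s e st := by
  induction fuel generalizing s hs with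
  | zero => rfl
  | succ fuel ih =>
    rw [A_unfold, normB_stable l s e he0 he1, collectPosF_succ]
    dsimp only
    rw [if_pos hst]
    split_ifs <;> first
      | rfl
      | (exfalso; omega)
      | (congr 1; exact ih (s + st) (by omega))

theorem C_of (k n' s e : Int) (hk : 0 < k) (he : 0 ≤ e)
    (h : s % k ≤ e ∨ s % k + n' - k ≤ e) :
    0 ≤ e - (e - s) % k ∨ e - (e - s) % k + n' ≤ e ∨ e - (e - s) % k < -n' := by
  have hq : k * (s / k) + s % k = s := Int.ediv_add_emod s k
  have hr0 : 0 ≤ s % k := Int.emod_nonneg s (by omega)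
  have hr1 : s % k < k := Int.emod_lt_of_pos s hk
  have hshift : (e - s) % k = (e - s % k) % k := by
    rw [show e - s = (e - s % k) + k * (-(s / k)) by linear_combination hq]
    exact Int.add_mul_emod_self_left (e - s % k) k (-(s / k))
  by_cases hle : s % k ≤ e
  · left
    have h0 : 0 ≤ e - s % k := by omega
    have hdiv : 0 ≤ (e - s % k) / k := Int.ediv_nonneg h0 (le_of_lt hk)
    have heq := Int.ediv_add_emod (e - s % k) k
    have hmul : 0 ≤ k * ((e - s % k) / k) := mul_nonneg (le_of_lt hk) hdiv
    omega
  · have hlt : e < s % k := by omega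
    have hcase : s % k + n' - k ≤ e := by omega
    right; left
    have h1 : (e - s % k) % k = e - s % k + k := by
      have h2 : (e - s % k + k) % k = e - s % k + k := Int.emod_eq_of_lt (by omega) (by omega)
      have h3 := Int.add_mul_emod_self_left (e - s % k) k 1
      rw [mul_one] at h3
      rw [← h3]
      exact h2
    omega

theorem neg_lemma (fuel : Nat) (l : List Int) (s e st : Int) (hst : st < 0)
    (he0 : 0 ≤ e) (he1 : e ≤ (l.length : Int)) (hs : s ≤ (l.length : Int)) (hlo : e + st < s)
    (hC : 0 ≤ e - (e - s) % (-st) ∨ e - (e - s) % (-st) + (l.length : Int) ≤ e ∨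
          e - (e - s) % (-st) < -(l.length : Int)) :
    sliceRFuel fuel l s e st = collectNegF fuel l s e st := by
  have hk : (0 : Int) < -st := by omega
  induction fuel generalizing s hs hlo hC with
  | zero => rfl
  | succ fuel ih =>
    rw [A_unfold, normB_stable l s e he0 he1, collectNegF_succ]
    dsimp only
    by_cases hse : s ≤ e
    · have hes : (e - s) % (-st) = e - s := Int.emod_eq_of_lt (by omega) (by omega)
      rw [hes] at hC
      split_ifs <;> first | rfl | (exfalso; omega)
    · have hsh : (e - (s + st)) % (-st) = (e - s) % (-st) := by
        rw [show e - (s + st) = (e - s) + (-st) * 1 by ring]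
        exact Int.add_mul_emod_self_left (e - s) (-st) 1
      split_ifs <;> first
        | rfl
        | (exfalso; omega)
        | (congr 1; exact ih (s + st) (by omega) (by omega) (by rw [hsh]; exact hC))

theorem normB_len (l : List Int) (a b : Int) :
    ((normB l a b).1.length : Int) ≤ (l.length : Int) + 1 := by
  simp only [normB]
  split_ifs <;> simp

-- inside D_: along the common descent both ports emit the same heads, but at the first index
-- ≤ e (which is then negative) B stops while A wraps it back above e and emits one more element
theorem neq_lemma (fuel : Nat) (l : List Int) (s e st : Int) (hst : st < 0)
    (he0 : 0 ≤ e) (he1 : e ≤ (l.length : Int)) (hs : s ≤ (l.length : Int))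
    (hlo : e + st < s) (hm1 : e < s % (-st)) (hm2 : e < s % (-st) + (l.length : Int) + st) :
    s - e ≤ ((fuel : Int) - 1) * (-st) → sliceRFuel fuel l s e st ≠ collectNegF fuel l s e st := by
  have hk : (0 : Int) < -st := by omega
  induction fuel generalizing s hs hlo hm1 hm2 with
  | zero =>
    intro hfuel
    exfalso
    have h0 : (((0 : Nat) : Int) - 1) * (-st) = st := by push_cast; ring
    rw [h0] at hfuel
    omega
  | succ fuel ih =>
    intro hfuel
    rw [A_unfold, normB_stable l s e he0 he1, collectNegF_succ]
    dsimp only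
    rw [if_neg (by omega : ¬ st > 0)]
    by_cases hse : s ≤ e
    · -- divergence point: the cursor is negative, A wraps it, B has stopped
      have hsneg : s < 0 := by
        by_contra hpos
        have hb := Int.emod_lt_of_pos s hk
        have : s % (-st) = s := Int.emod_eq_of_lt (by omega) (by omega)
        omega
      have hmod : s % (-st) = s + (-st) := by
        have h1 : (s + (-st) * 1) % (-st) = s % (-st) := Int.add_mul_emod_self_left s (-st) 1
        rw [mul_one] at h1
        rw [← h1]
        exact Int.emod_eq_of_lt (by omega) (by omega)
      have hwrap : s + (l.length : Int) > e := by omega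
      have hchain :
          (if s > (l.length : Int) then (l.length : Int)
           else if s < -(l.length : Int) then 0
           else if s < 0 then s + l.length else s) = s + l.length := by
        split_ifs <;> omega
      rw [hchain, if_neg (by omega : ¬ s + (l.length : Int) ≤ e), if_neg (by omega : ¬ s > e)]
      exact List.cons_ne_nil _ _
    · -- both emit the same head; the tails differ by the induction hypothesis
      have hchain :
          (if s > (l.length : Int) then (l.length : Int)
           else if s < -(l.length : Int) then 0
           else if s < 0 then s + l.length else s) = s := by
        split_ifs <;> omega
      rw [hchain, if_neg (by omega : ¬ s ≤ e), if_pos (by omega : s > e)]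
      have hsh : (s + st) % (-st) = s % (-st) := by
        rw [show s + st = s + (-st) * (-1) by ring]
        exact Int.add_mul_emod_self_left s (-st) (-1)
      have hexp : (((fuel + 1 : Nat) : Int) - 1) * (-st) = ((fuel : Int) - 1) * (-st) + (-st) := by
        push_cast; ring
      intro h
      injection h with h1 h2
      exact ih (s + st) (by omega) (by omega) (by rw [hsh]; omega) (by rw [hsh]; omega)
        (by rw [hexp] at hfuel; linarith) h2

-- ===== VERDICT (by name: the statement is the Claim_ definition above) =====
theorem slice_r_spec : Claim_unchanged_slice_r := by
  unfold Claim_unchanged_slice_r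
  intro l a b st hdom hpre
  unfold Spec_slice_r
  intro hnd
  unfold slice_r slice_r_alt
  have hbr := normD_normB l a b
  have hinv := normB_inv l a b
  rcases hnb : normB l a b with ⟨l2, s, e⟩
  rw [hnb] at hbr hinv
  dsimp only at hbr hinv ⊢
  unfold Pre_slice_r at hpre
  unfold D_slice_r at hnd
  rw [hbr] at hpre hnd
  dsimp only at hpre hnd
  have hA := A_unfold (l.length + 1) l a b st
  rw [hnb] at hA
  dsimp only at hA
  rw [show l.length + 2 = (l.length + 1) + 1 from rfl, hA]
  obtain ⟨h1, h2, h3, h4⟩ := hinv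
  by_cases hst : st > 0
  · rw [if_pos hst, if_pos hst, collectPosF_succ]
    split_ifs <;> first
      | rfl
      | (exfalso; omega)
      | (congr 1; exact pos_lemma (l.length + 1) l2 (s + st) e st hst (by omega) h3 h4)
  · rw [if_neg hst, if_neg hst, collectNegF_succ]
    rw [if_neg hst] at hpre
    by_cases hst0 : st = 0
    · rw [if_pos hst0] at hpre
      split_ifs <;> first | rfl | (exfalso; omega)
    · rw [if_neg hst0] at hpre
      by_cases hse : s ≤ e
      · split_ifs <;> first | rfl | (exfalso; omega)
      · have hlt : s < (l2.length : Int) := by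
          rcases hpre with hpe | ⟨hne, _⟩
          · omega
          · omega
        have hD : s % (-st) ≤ e ∨ s % (-st) + (l2.length : Int) + st ≤ e := by
          by_contra hcon
          push_neg at hcon
          exact hnd ⟨by omega, by omega, hlt, by omega, by omega⟩
        have harg : s % (-st) ≤ e ∨ s % (-st) + (l2.length : Int) - (-st) ≤ e := by
          rcases hD with h | h
          · exact Or.inl h
          · right; omega
        have hC := C_of (-st) ((l2.length : Int)) s e (by omega) h3 harg
        have hsh : (e - (s + st)) % (-st) = (e - s) % (-st) := by
          rw [show e - (s + st) = (e - s) + (-st) * 1 by ring]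
          exact Int.add_mul_emod_self_left (e - s) (-st) 1
        split_ifs <;> first
          | rfl
          | (exfalso; omega)
          | (congr 1;
             exact neg_lemma (l.length + 1) l2 (s + st) e st (by omega) h3 h4 (by omega) (by omega)
               (by rw [hsh]; exact hC))

theorem slice_r_changed : Claim_changed_slice_r := by
  unfold Claim_changed_slice_r; decide

theorem slice_r_tight : Claim_exact_slice_r := by
  unfold Claim_exact_slice_r
  intro l a b st hdom hpre hd
  unfold slice_r slice_r_alt
  have hbr := normD_normB l a b
  have hinv := normB_inv l a b
  have hlen := normB_len l a b
  rcases hnb : normB l a b with ⟨l2, s, e⟩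
  rw [hnb] at hbr hinv hlen
  dsimp only at hbr hinv hlen ⊢
  unfold D_slice_r at hd
  rw [hbr] at hd
  dsimp only at hd
  obtain ⟨h1, h2, h3, h4⟩ := hinv
  obtain ⟨hst, hes, hsm, hm1, hm2⟩ := hd
  rw [if_neg (by omega : ¬ st > 0)]
  have hchain :
      (if s > (l2.length : Int) then (l2.length : Int)
       else if s < -(l2.length : Int) then 0
       else if s < 0 then s + l2.length else s) = s := by
    split_ifs <;> omega
  have hAeq : sliceRFuel (l.length + 2) l a b st = sliceRFuel (l.length + 2) l2 s e st := by
    rw [show l.length + 2 = (l.length + 1) + 1 from rfl]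
    rw [A_unfold (l.length + 1) l a b st, hnb, A_unfold (l.length + 1) l2 s e st,
      normB_stable l2 s e h3 h4]
    dsimp only
    rw [hchain]
  rw [hAeq]
  refine neq_lemma (l.length + 2) l2 s e st hst h3 h4 (by omega) (by omega) hm1 hm2 ?_
  have hk1 : (1 : Int) ≤ -st := by omega
  have hmul : ((l.length : Int) + 1) ≤ ((l.length : Int) + 1) * (-st) :=
    le_mul_of_one_le_right (by positivity) hk1
  have hcast : (((l.length + 2 : Nat) : Int) - 1) * (-st) = ((l.length : Int) + 1) * (-st) := by
    push_cast; ring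
  rw [hcast]
  linarith
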